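-- pv_equiv track=rewrite | github.com/anurag5398/DSA-Problems | GameTheory/makePalindrome.py | solve
-- ===== SOURCE A (Python) =====
-- def solve(A: str) -> int:
--     from collections import defaultdict
--     count = defaultdict(int)
--     for i in A:
--         count[i]+=1
--
--     oddvals = 0
--     for v in count.values():
--         if v%2 != 0: oddvals+=1
--
--     if oddvals % 2 == 0: return 2
--     return 1
-- ===== SOURCE B (Python) =====
-- def solve(A: str) -> int:
--     odd = set()
--     for ch in A:
--         if ch in odd:
--             odd.discard(ch)
--         else:
--             odd.add(ch)
--     return 2 if len(odd) % 2 == 0 else 1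
-- ===== Notes on version B (the rewrite author's own statement) =====
-- stated objective: idiomatic
-- what changed: Replaces the count-dict plus second value-scan with a single toggling pass over a set of characters seen an odd number of times; the answer is the parity of that set's size.
import Mathlib
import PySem

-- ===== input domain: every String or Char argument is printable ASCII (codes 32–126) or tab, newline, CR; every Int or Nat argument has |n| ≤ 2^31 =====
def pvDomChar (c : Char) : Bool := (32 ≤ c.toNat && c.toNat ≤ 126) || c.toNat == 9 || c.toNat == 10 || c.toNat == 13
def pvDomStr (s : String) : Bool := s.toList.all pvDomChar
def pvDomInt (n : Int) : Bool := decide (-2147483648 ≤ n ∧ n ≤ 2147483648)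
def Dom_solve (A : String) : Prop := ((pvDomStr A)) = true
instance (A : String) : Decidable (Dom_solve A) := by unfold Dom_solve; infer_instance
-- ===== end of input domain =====

-- B replaces A's count dict + second scan over its values with one toggling pass over a
-- set of odd-count characters (idiomatic; same return value everywhere).

-- ===== PORT A =====
def solve (A : String) : Int :=
  let count := A.toList.foldl (fun d c => PySem.Dict.modify d c 0 (· + 1)) PySem.Dict.empty
  let oddvals := count.values.foldl
    (fun acc v => if PySem.Int.mod v 2 ≠ 0 then acc + 1 else acc) (0 : Int)
  if PySem.Int.mod oddvals 2 = 0 then 2 else 1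

-- ===== PORT B =====
def solve_alt (A : String) : Int :=
  let odd := A.toList.foldl
    (fun s c => if PySem.Set.contains s c then PySem.Set.discard s c else PySem.Set.add s c)
    PySem.Set.empty
  if PySem.Int.mod (PySem.Set.len odd) 2 = 0 then 2 else 1

-- ===== PRECONDITION & SPEC =====
def Spec_solve (A : String) (out : Int) : Prop := out = solve_alt A
instance (A : String) (out : Int) : Decidable (Spec_solve A out) := by unfold Spec_solve; infer_instance

-- ===== CLAIM (what is proved, stated in full; the proofs are below) =====
def Claim_equal_solve : Prop := ∀ (A : String), Dom_solve A → Spec_solve A (solve A)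

-- ===== LEMMAS AND PROOFS =====

-- Python's % (floor mod) agrees with Lean's emod for the positive divisor 2.
theorem pymod_two (v : Int) : PySem.Int.mod v 2 = v % 2 := by
  simp [PySem.Int.mod, Int.fmod_eq_emod]

-- A's second loop (count-if fold over the dict values) is countP.
theorem foldl_countif (l : List Int) (acc : Int) :
    l.foldl (fun acc v => if v % 2 ≠ 0 then acc + 1 else acc) acc
      = acc + (l.countP (fun v => v % 2 ≠ 0) : Int) := by
  induction l generalizing acc with
  | nil => simp
  | cons x xs ih =>
    simp only [List.foldl_cons, List.countP_cons, ih]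
    by_cases h : x % 2 ≠ 0 <;> simp [h] <;> push_cast <;> omega

-- Membership in B's toggle set: a character is in it iff its membership in the start set
-- disagrees with the parity of its count in the remaining list.
theorem toggle_mem (l : List Char) (s : PySem.Set Char) (c : Char) :
    c ∈ l.foldl
        (fun s c => if PySem.Set.contains s c then PySem.Set.discard s c else PySem.Set.add s c) s
      ↔ ((c ∈ s ∧ l.count c % 2 = 0) ∨ (c ∉ s ∧ l.count c % 2 = 1)) := by
  induction l generalizing s with
  | nil => simp
  | cons x xs ih =>
    simp only [List.foldl_cons, List.count_cons]
    by_cases hc : c = x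
    · subst hc
      simp only [BEq.rfl, if_pos rfl]
      by_cases hm : PySem.Set.contains s c
      · have hm' : c ∈ s := (PySem.Set.contains_iff s c).mp hm
        rw [if_pos hm, ih]
        simp [PySem.Set.mem_discard, hm']
        omega
      · have hm' : c ∉ s := fun h => hm ((PySem.Set.contains_iff s c).mpr h)
        rw [if_neg hm, ih]
        simp [PySem.Set.mem_add, hm']
        omega
    · have hxc : (x == c) = false := by
        simp only [beq_eq_false_iff_ne, ne_eq]; exact fun h => hc h.symm
      simp only [hxc, if_false, Nat.add_zero]
      by_cases hm : PySem.Set.contains s x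
      · rw [if_pos hm, ih]
        simp [PySem.Set.mem_discard, hc]
      · rw [if_neg hm, ih]
        simp [PySem.Set.mem_add, hc]

-- The toggle set stays duplicate-free.
theorem toggle_nodup (l : List Char) (s : PySem.Set Char) (hs : s.Nodup) :
    (l.foldl
        (fun s c => if PySem.Set.contains s c then PySem.Set.discard s c else PySem.Set.add s c)
        s).Nodup := by
  induction l generalizing s with
  | nil => exact hs
  | cons x xs ih =>
    simp only [List.foldl_cons]
    by_cases hm : PySem.Set.contains s x
    · rw [if_pos hm]; exact ih _ (PySem.Set.nodup_discard s x hs)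
    · rw [if_neg hm]; exact ih _ (PySem.Set.nodup_add s x hs)

-- A's value of oddvals: the number of distinct characters with odd count.
theorem a_oddvals (l : List Char) :
    ((l.foldl (fun d c => PySem.Dict.modify d c 0 (· + 1)) PySem.Dict.empty).values.foldl
        (fun acc (v : Int) => if v % 2 ≠ 0 then acc + 1 else acc) (0 : Int))
      = ((PySem.Set.ofList l).countP (fun k => l.count k % 2 = 1) : Int) := by
  have hctr : (l.foldl (fun d c => PySem.Dict.modify d c 0 (· + 1)) PySem.Dict.empty)
      = PySem.Dict.counter l := rfl
  rw [hctr]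
  have hvals : (PySem.Dict.counter l).values
      = (PySem.Set.ofList l).map (fun k => (l.count k : Int)) := by
    have := PySem.Dict.items_counter (xs := l)
    simp only [PySem.Dict.values, this, List.map_map]
    rfl
  rw [hvals, foldl_countif, List.countP_map, zero_add]
  congr 1
  apply List.countP_congr
  intro c _
  simp only [Function.comp, decide_eq_true_eq, ne_eq]
  omega

-- B's set size equals the same count of distinct characters with odd count.
theorem b_len (l : List Char) :
    PySem.Set.len (l.foldl
        (fun s c => if PySem.Set.contains s c then PySem.Set.discard s c else PySem.Set.add s c)
        PySem.Set.empty)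
      = ((PySem.Set.ofList l).countP (fun k => l.count k % 2 = 1) : Int) := by
  have hperm : (l.foldl
      (fun s c => if PySem.Set.contains s c then PySem.Set.discard s c else PySem.Set.add s c)
      PySem.Set.empty).Perm
      ((PySem.Set.ofList l).filter (fun k => l.count k % 2 = 1)) := by
    rw [List.perm_ext_iff_of_nodup (toggle_nodup l PySem.Set.empty (by simp [PySem.Set.empty]))
      ((PySem.Set.nodup_ofList l).filter _)]
    intro c
    rw [toggle_mem, List.mem_filter, PySem.Set.mem_ofList]
    constructor
    · rintro (⟨h, _⟩ | ⟨_, h⟩)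
      · exact absurd h List.not_mem_nil
      · exact ⟨List.count_pos_iff.mp (by omega), by simpa using h⟩
    · rintro ⟨_, h⟩
      exact Or.inr ⟨List.not_mem_nil, by simpa using h⟩
  unfold PySem.Set.len
  rw [hperm.length_eq, List.countP_eq_length_filter]

theorem solve_eq_alt (A : String) : solve A = solve_alt A := by
  simp only [solve, solve_alt, pymod_two]
  rw [a_oddvals, b_len]

-- ===== VERDICT (by name: the statement is the Claim_ definition above) =====
theorem solve_spec : Claim_equal_solve := by
  intro A _
  unfold Spec_solve
  exact solve_eq_alt A
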